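-- pv_equiv track=rewrite | github.com/kodanda1/Projects | CSE_331/CC5/solution.py | check_walls_cover
-- ===== SOURCE A (Python) =====
-- from typing import List
--
-- def check_walls_cover(walls: List[int]) -> List[int]:
--     """
-- check_walls_cover function returns the list of number of
-- walls which are visible from individual wall.
-- The function takes the list of height of walls.
-- It returns the list consisting of the number walls visible
-- from each wall.
-- Parameters:
-- walls: List[int]): A Python list of length n, containing integers,
-- that represents the height of the walls.
-- Returns:
-- List[int]:A Python list of length n, containing integers, consisting
-- of the number of walls visible from each wall.
--     """
--     def calculate(walls):
--         """
--             helper function for calculation.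
--         """
--         length = len(walls)
--         temp = [0] * length
--         slist = []
--         for _ in range(length):
--             if len(slist) == 0:
--                 temp[_] = 0
--             elif slist[-1] > walls[_]:
--                 temp[_] = len(slist)
--             else:
--                 while len(slist) > 0 and slist[-1] < walls[_]:
--                     slist.pop()
--                 temp[_] = len(slist)
--             slist.append(walls[_])
--         return temp
--     symmetric = 0
--     rwalls = walls[::-1]
--     if walls == rwalls and len(walls) % 2 == 0:
--         symmetric = 1
--     score_normal = calculate(walls)
--     score_reverse = calculate(rwalls)
--     score_reverse.reverse()
--     output = list()
--     if symmetric == 0: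
--         for data1, data2 in zip(score_normal, score_reverse):
--             output.append(data1 + data2)
--     else:
--         for data1, data2 in zip(score_normal, score_reverse):
--             output.append(data1 + data2 - 1)
--     return output
-- ===== SOURCE B (Python) =====
-- from typing import List
--
-- def check_walls_cover(walls: List[int]) -> List[int]:
--     """Per-index record scan: from wall i, a wall is visible in a direction if
--     its height meets or exceeds every wall between (running max starting at
--     walls[i]); even-length palindromes get 1 subtracted everywhere."""
--     def scan(m, seq):
--         c = 0
--         for y in seq:
--             if y >= m:
--                 c += 1
--                 m = y
--         return c
--     left = []          # prefix before i, nearest wall first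
--     out = []
--     for i, x in enumerate(walls):
--         out.append(scan(x, left) + scan(x, walls[i + 1:]))
--         left = [x] + left
--     if len(walls) % 2 == 0 and walls == walls[::-1]:
--         out = [c - 1 for c in out]
--     return out
-- ===== Notes on version B (the rewrite author's own statement) =====
-- stated objective: simpler
-- what changed: Replaces the two monotonic-stack passes (forward and reversed, then zipped, with the even-palindrome branch duplicated over the zip) by a direct per-index running-max scan in each direction, with the palindrome adjustment as a single map at the end.
import Mathlib
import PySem

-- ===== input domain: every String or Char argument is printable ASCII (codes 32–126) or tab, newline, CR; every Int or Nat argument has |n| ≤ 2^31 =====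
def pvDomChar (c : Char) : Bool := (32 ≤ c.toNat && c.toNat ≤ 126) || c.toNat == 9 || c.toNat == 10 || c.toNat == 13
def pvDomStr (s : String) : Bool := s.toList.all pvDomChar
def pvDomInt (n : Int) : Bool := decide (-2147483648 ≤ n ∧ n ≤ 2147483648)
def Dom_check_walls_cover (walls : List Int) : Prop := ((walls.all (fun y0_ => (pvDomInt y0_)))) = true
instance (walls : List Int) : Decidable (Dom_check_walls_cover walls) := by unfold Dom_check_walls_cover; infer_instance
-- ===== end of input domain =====

-- B replaces A's two monotonic-stack passes by a per-index running-max scan in both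
-- directions: simpler, not faster (A is O(n), B is O(n^2)).

-- ===== PORT A =====
-- the stack slist is held top-first: Python's append → cons, slist[-1] → head, pop() → tail
-- 'while len(slist) > 0 and slist[-1] < walls[_]: slist.pop()'
def aPopLoop (slist : List Int) (x : Int) : List Int :=
  match slist with
  | [] => []
  | t :: s => if t < x then aPopLoop s x else t :: s

-- one iteration of calculate's for-loop; temp[_] is assigned at successive
-- indices 0,1,2,…, which is transcribed as appending the entry to temp
def aStep (st : List Int × List Int) (x : Int) : List Int × List Int :=
  match st with
  | (temp, slist) =>
    match slist with
    | [] => (temp ++ [(0 : Int)], [x])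
    | t :: s =>
      if t > x then (temp ++ [((t :: s).length : Int)], x :: t :: s)
      else
        let s' := aPopLoop (t :: s) x
        (temp ++ [(s'.length : Int)], x :: s')

def aCalculate (walls : List Int) : List Int :=
  (walls.foldl aStep ([], [])).1

def check_walls_cover (walls : List Int) : List Int :=
  let rwalls := walls.reverse                          -- walls[::-1]
  let symmetric : Int := if walls = rwalls ∧ walls.length % 2 = 0 then 1 else 0
  let score_normal := aCalculate walls
  let score_reverse := (aCalculate rwalls).reverse     -- score_reverse.reverse()
  if symmetric = 0 then
    List.zipWith (fun d1 d2 => d1 + d2) score_normal score_reverse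
  else
    List.zipWith (fun d1 d2 => d1 + d2 - 1) score_normal score_reverse

-- ===== PORT B =====
-- 'scan(m, seq)': count elements ≥ the running max m, updating m on each hit
def bScan (m : Int) (seq : List Int) : Int :=
  match seq with
  | [] => 0
  | y :: r => if m ≤ y then 1 + bScan y r else bScan m r

-- the main for-loop: left = reversed prefix before the current wall, rest = walls[i:]
def bGo (left rest : List Int) : List Int :=
  match rest with
  | [] => []
  | x :: tail => (bScan x left + bScan x tail) :: bGo (x :: left) tail

def check_walls_cover_alt (walls : List Int) : List Int :=
  let out := bGo [] walls
  if walls.length % 2 = 0 ∧ walls = walls.reverse then out.map (fun c => c - 1)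
  else out

-- ===== PRECONDITION & SPEC =====
def Spec_check_walls_cover (walls : List Int) (out : List Int) : Prop := out = check_walls_cover_alt walls
instance (walls : List Int) (out : List Int) : Decidable (Spec_check_walls_cover walls out) := by unfold Spec_check_walls_cover; infer_instance

-- ===== CLAIM (what is proved, stated in full; the proofs are below) =====
def Claim_equal_check_walls_cover : Prop := ∀ (walls : List Int), Dom_check_walls_cover walls → Spec_check_walls_cover walls (check_walls_cover walls)

-- ===== LEMMAS AND PROOFS =====

-- the stack A maintains, as a function of the reversed processed prefix
def pvRecs : List Int → List Int
  | [] => []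
  | y :: r => y :: List.dropWhile (fun v => decide (v < y)) (pvRecs r)

-- A's left-count list over a zipper (rev = reversed prefix)
def pvGo : List Int → List Int → List Int
  | _, [] => []
  | rev, x :: l => bScan x rev :: pvGo (x :: rev) l

-- the reversed calculate-of-the-reverse, as right-counts
def pvGoR : List Int → List Int → List Int
  | [], _ => []
  | x :: rest, rev => bScan x (rest ++ rev) :: pvGoR rest rev

theorem dropWhile_dropWhile (l : List Int) (y x : Int) (h : y ≤ x) :
    List.dropWhile (fun v => decide (v < x)) (List.dropWhile (fun v => decide (v < y)) l)
      = List.dropWhile (fun v => decide (v < x)) l := by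
  induction l with
  | nil => simp
  | cons a t ih =>
    by_cases hy : a < y
    · have hx : a < x := lt_of_lt_of_le hy h
      simpa [List.dropWhile, hy, hx] using ih
    · simp [List.dropWhile, hy]

theorem aPopLoop_eq (s : List Int) (x : Int) :
    aPopLoop s x = List.dropWhile (fun v => decide (v < x)) s := by
  induction s with
  | nil => simp [aPopLoop]
  | cons t r ih =>
    by_cases h : t < x
    · simp [aPopLoop, List.dropWhile, h, ih]
    · simp [aPopLoop, List.dropWhile, h]

theorem scan_drop (rev : List Int) (x : Int) :
    bScan x rev = ((List.dropWhile (fun v => decide (v < x)) (pvRecs rev)).length : Int) := by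
  induction rev generalizing x with
  | nil => simp [bScan, pvRecs]
  | cons y r ih =>
    by_cases h : x ≤ y
    · have : ¬ (y < x) := not_lt.mpr h
      simp [bScan, pvRecs, h, this, ih y]
      omega
    · have hy : y < x := not_le.mp h
      simp [bScan, pvRecs, h, hy,
        dropWhile_dropWhile (pvRecs r) y x (le_of_lt hy), ih x]

theorem step_char (temp rev : List Int) (x : Int) :
    aStep (temp, pvRecs rev) x = (temp ++ [bScan x rev], pvRecs (x :: rev)) := by
  have hscan := scan_drop rev x
  rcases h : pvRecs rev with _ | ⟨t, s⟩
  · simp [aStep, pvRecs, h] at hscan ⊢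
    exact hscan.symm
  · by_cases ht : t > x
    · have hnt : ¬ (t < x) := by omega
      simp [aStep, pvRecs, h, ht, hnt] at hscan ⊢
      exact hscan.symm
    · simp [aStep, pvRecs, h, ht, aPopLoop_eq] at hscan ⊢
      exact hscan.symm

theorem calc_char (l : List Int) : ∀ (temp rev : List Int),
    List.foldl aStep (temp, pvRecs rev) l = (temp ++ pvGo rev l, pvRecs (l.reverse ++ rev)) := by
  induction l with
  | nil => intro temp rev; simp [pvGo]
  | cons x l ih =>
    intro temp rev
    simp only [List.foldl, step_char, ih (temp ++ [bScan x rev]) (x :: rev), pvGo]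
    simp

theorem aCalculate_eq (walls : List Int) : aCalculate walls = pvGo [] walls := by
  have h := calc_char walls [] []
  simp [pvRecs] at h
  simp [aCalculate, h]

theorem go_append (p : List Int) : ∀ (rev : List Int) (x : Int),
    pvGo rev (p ++ [x]) = pvGo rev p ++ [bScan x (p.reverse ++ rev)] := by
  induction p with
  | nil => intro rev x; simp [pvGo]
  | cons a t ih =>
    intro rev x
    simp [pvGo, ih (a :: rev) x]

theorem go_rev (l : List Int) : ∀ (rev : List Int),
    (pvGo rev l.reverse).reverse = pvGoR l rev := by
  induction l with
  | nil => intro rev; simp [pvGo, pvGoR]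
  | cons x rest ih =>
    intro rev
    simp [go_append, pvGoR, ih rev]

theorem zip_go (l : List Int) : ∀ (rev : List Int),
    List.zipWith (fun d1 d2 => d1 + d2) (pvGo rev l) (pvGoR l []) = bGo rev l := by
  induction l with
  | nil => intro rev; simp [pvGo, pvGoR, bGo]
  | cons x rest ih =>
    intro rev
    simp only [pvGo, pvGoR, bGo, List.zipWith, List.append_nil]
    rw [ih (x :: rev)]

theorem zip_sub (xs : List Int) : ∀ (ys : List Int),
    List.zipWith (fun d1 d2 => d1 + d2 - 1) xs ys
      = (List.zipWith (fun d1 d2 => d1 + d2) xs ys).map (fun c => c - 1) := by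
  induction xs with
  | nil => intro ys; simp
  | cons a t ih =>
    intro ys
    cases ys with
    | nil => simp
    | cons b u =>
      simp only [List.zipWith, List.map]
      rw [ih u]

theorem main_eq (walls : List Int) :
    check_walls_cover walls = check_walls_cover_alt walls := by
  have hbase : List.zipWith (fun d1 d2 => d1 + d2) (aCalculate walls)
      ((aCalculate walls.reverse).reverse) = bGo [] walls := by
    rw [aCalculate_eq walls, aCalculate_eq walls.reverse, go_rev walls [], zip_go walls []]
  by_cases hp : walls.length % 2 = 0 ∧ walls = walls.reverse
  · have hp' : walls = walls.reverse ∧ walls.length % 2 = 0 := ⟨hp.2, hp.1⟩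
    simp only [check_walls_cover, check_walls_cover_alt, if_pos hp', if_pos hp]
    rw [if_neg (by norm_num : ¬ ((1 : Int) = 0))]
    rw [zip_sub, hbase]
  · have hp' : ¬ (walls = walls.reverse ∧ walls.length % 2 = 0) := fun h => hp ⟨h.2, h.1⟩
    simp only [check_walls_cover, check_walls_cover_alt, if_neg hp', if_neg hp]
    rw [if_pos trivial]
    exact hbase

-- ===== VERDICT (by name: the statement is the Claim_ definition above) =====
theorem check_walls_cover_spec : Claim_equal_check_walls_cover := by
  intro walls _
  unfold Spec_check_walls_cover
  exact main_eq walls
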